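-- pv_equiv track=rewrite | github.com/YaqiangCao/ryder | build/lib/src/patrol.py | buildCov
-- ===== SOURCE A (Python) =====
-- def buildCov(regions):
--     """
--     Build a coverage dictionary and range limits for genomic regions.
--
--     :param regions: list of regions [chrom, start, end].
--     :return: tuple (cov, lims)
--              - cov: dict mapping each chromosome to a set of covered positions.
--              - lims: dict mapping each chromosome to [min_start, max_end].
--     """
--     cov = {}
--     lims = {}
--     for region in regions:
--         chrom, start, end = region
--         cov.setdefault(chrom, set()).update(range(start, end + 1))
--         if chrom not in lims:
--             lims[chrom] = [start, end]
--         else: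
--             if start < lims[chrom][0]:
--                 lims[chrom][0] = start
--             if end > lims[chrom][1]:
--                 lims[chrom][1] = end
--     return cov, lims
-- ===== SOURCE B (Python) =====
-- def buildCov(regions):
--     """
--     Build a coverage dictionary and range limits for genomic regions.
--
--     Alternative decomposition: first group the (start, end) pairs per chromosome
--     in one pass, then produce cov and lims per group.
--     """
--     groups = {}
--     for chrom, start, end in regions:
--         groups.setdefault(chrom, []).append((start, end))
--     cov = {}
--     lims = {}
--     for chrom, pairs in groups.items():
--         s = set()
--         for a, b in pairs:
--             s.update(range(a, b + 1))
--         cov[chrom] = s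
--         lims[chrom] = [min(a for a, _ in pairs), max(b for _, b in pairs)]
--     return cov, lims
-- ===== Notes on version B (the rewrite author's own statement) =====
-- stated objective: alternative
-- what changed: B replaces A's single incremental pass that updates both dicts per region with a group-by-chromosome index built first, followed by a per-group pass that unions the ranges and computes the limits with min/max over the grouped starts/ends.
import Mathlib
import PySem

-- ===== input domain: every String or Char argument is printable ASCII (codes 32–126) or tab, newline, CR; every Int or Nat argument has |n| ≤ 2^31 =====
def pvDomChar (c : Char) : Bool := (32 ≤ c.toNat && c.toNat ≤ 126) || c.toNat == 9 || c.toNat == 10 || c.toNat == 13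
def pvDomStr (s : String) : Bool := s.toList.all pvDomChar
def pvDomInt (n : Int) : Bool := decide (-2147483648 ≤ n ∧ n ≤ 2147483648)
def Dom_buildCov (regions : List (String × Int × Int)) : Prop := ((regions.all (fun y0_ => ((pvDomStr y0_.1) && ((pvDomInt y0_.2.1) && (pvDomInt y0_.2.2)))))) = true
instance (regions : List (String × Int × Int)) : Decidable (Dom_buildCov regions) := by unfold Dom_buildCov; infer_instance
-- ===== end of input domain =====

-- B builds a chrom -> [(start,end)] grouping index first, then derives cov and lims per group
-- (alternative decomposition, same cost); A updates both dicts incrementally per region.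


-- ===== PORT A =====
-- cov.setdefault(chrom, set()).update(range(start, end+1)) mutates the set held in the
-- dict in place; its net effect on the dict is PySem.Dict.modify at that key.
def pvAddRange (s : PySem.Set Int) (a b : Int) : PySem.Set Int :=
  (PySem.List.pyRange a (b + 1) 1).foldl PySem.Set.add s

-- The in-place updates of lims[chrom][0]/[1] are ported as inserting the updated
-- two-element list; lims values are always [lo, hi], so pyGetD's default is never used.
def pvLimStep (o : Option (List Int)) (s e : Int) : List Int :=
  match o with
  | none => [s, e]
  | some l =>
      [if s < PySem.List.pyGetD l 0 0 then s else PySem.List.pyGetD l 0 0,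
       if PySem.List.pyGetD l 1 0 < e then e else PySem.List.pyGetD l 1 0]

def buildCov (regions : List (String × Int × Int)) : (List (String × List Int)) × (List (String × List Int)) :=
  let st := regions.foldl
    (fun (st : PySem.Dict String (PySem.Set Int) × PySem.Dict String (List Int)) r =>
      (st.1.modify r.1 [] (fun s => pvAddRange s r.2.1 r.2.2),
       st.2.insert r.1 (pvLimStep (st.2.get? r.1) r.2.1 r.2.2)))
    (PySem.Dict.empty, PySem.Dict.empty)
  (st.1.items, st.2.items)

-- ===== PORT B =====
def buildCov_alt (regions : List (String × Int × Int)) : (List (String × List Int)) × (List (String × List Int)) :=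
  let groups : PySem.Dict String (List (Int × Int)) :=
    regions.foldl (fun d p => d.modify p.1 [] (fun x => x ++ [p.2])) PySem.Dict.empty
  -- second loop: for chrom, pairs in groups.items() — pairs is never empty, so the
  -- getD 0 defaults after min?/max? (Python's min/max on a nonempty iterable) are never used.
  let st := groups.items.foldl
    (fun (st : PySem.Dict String (PySem.Set Int) × PySem.Dict String (List Int)) g =>
      (st.1.insert g.1 (g.2.foldl (fun s p => pvAddRange s p.1 p.2) []),
       st.2.insert g.1 [((PySem.List.min? (g.2.map Prod.fst) (fun x => x)).getD 0),
                        ((PySem.List.max? (g.2.map Prod.snd) (fun x => x)).getD 0)]))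
    (PySem.Dict.empty, PySem.Dict.empty)
  (st.1.items, st.2.items)

-- ===== PRECONDITION & SPEC =====
def Spec_buildCov (regions : List (String × Int × Int)) (out : (List (String × List Int)) × (List (String × List Int))) : Prop := out = buildCov_alt regions
instance (regions : List (String × Int × Int)) (out : (List (String × List Int)) × (List (String × List Int))) : Decidable (Spec_buildCov regions out) := by unfold Spec_buildCov; infer_instance

-- ===== CLAIM (what is proved, stated in full; the proofs are below) =====
def Claim_equal_buildCov : Prop := ∀ (regions : List (String × Int × Int)), Dom_buildCov regions → Spec_buildCov regions (buildCov regions)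

-- ===== LEMMAS AND PROOFS =====

-- A's cov fold, characterized per key: the accumulated set at key c is the fold of
-- pvAddRange over the (start,end) pairs of the regions whose chromosome is c.
theorem covA_getD (l : List (String × Int × Int)) (d : PySem.Dict String (PySem.Set Int)) (c : String) :
    (l.foldl (fun d r => d.modify r.1 [] (fun s => pvAddRange s r.2.1 r.2.2)) d).getD c []
      = ((l.filter (fun p => p.1 == c)).map (fun x => x.2)).foldl
          (fun s p => pvAddRange s p.1 p.2) (d.getD c []) := by
  induction l generalizing d with
  | nil => rfl
  | cons r t ih =>
      simp only [List.foldl_cons, ih, List.filter_cons]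
      by_cases h : r.1 = c
      · subst h
        simp
      · have hb : (r.1 == c) = false := by simp [h]
        simp [hb, PySem.Dict.getD_modify, Ne.symm h]

-- A's lims fold, characterized per key via get?.
theorem limsA_get? (l : List (String × Int × Int)) (d : PySem.Dict String (List Int)) (c : String) :
    (l.foldl (fun d r => d.insert r.1 (pvLimStep (d.get? r.1) r.2.1 r.2.2)) d).get? c
      = ((l.filter (fun p => p.1 == c)).map (fun x => x.2)).foldl
          (fun o p => some (pvLimStep o p.1 p.2)) (d.get? c) := by
  induction l generalizing d with
  | nil => rfl
  | cons r t ih =>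
      simp only [List.foldl_cons, ih, List.filter_cons]
      by_cases h : r.1 = c
      · subst h
        simp
      · have hb : (r.1 == c) = false := by simp [h]
        simp [hb, PySem.Dict.get?_insert, Ne.symm h]

-- the lims fold over a nonempty pair list computes [min of starts, max of ends]
theorem limsFold_closed (ps : List (Int × Int)) (s e : Int) :
    ps.foldl (fun o p => some (pvLimStep o p.1 p.2)) (some [s, e])
      = some [(ps.map Prod.fst).foldl (fun m x => if x < m then x else m) s,
              (ps.map Prod.snd).foldl (fun m x => if m < x then x else m) e] := by
  induction ps generalizing s e with
  | nil => rfl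
  | cons p t ih =>
      have h : pvLimStep (some [s, e]) p.1 p.2
          = [if p.1 < s then p.1 else s, if e < p.2 then p.2 else e] := by
        simp [pvLimStep, PySem.List.pyGetD]
      simp only [List.foldl_cons, List.map_cons, h, ih]

-- Python's min over a nonempty int list as a fold
theorem min?_closed (x : Int) (r : List Int) :
    PySem.List.min? (x :: r) (fun y => y) = some (r.foldl (fun m y => if y < m then y else m) x) := by
  simp only [PySem.List.min?, List.foldl_cons]
  induction r generalizing x with
  | nil => rfl
  | cons y t ih =>
      simp only [List.foldl_cons]
      by_cases h : y < x <;> simp [h, ih]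

theorem max?_closed (x : Int) (r : List Int) :
    PySem.List.max? (x :: r) (fun y => y) = some (r.foldl (fun m y => if m < y then y else m) x) := by
  simp only [PySem.List.max?, List.foldl_cons]
  induction r generalizing x with
  | nil => rfl
  | cons y t ih =>
      simp only [List.foldl_cons]
      by_cases h : x < y <;> simp [h, ih]

-- value B stores in lims for a group's pair list
def pvLimB (ps : List (Int × Int)) : List Int :=
  [(PySem.List.min? (ps.map Prod.fst) (fun x => x)).getD 0,
   (PySem.List.max? (ps.map Prod.snd) (fun x => x)).getD 0]

theorem buildCov_eq (regions : List (String × Int × Int)) :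
    buildCov regions = buildCov_alt regions := by
  simp only [buildCov, buildCov_alt]
  set G : PySem.Dict String (List (Int × Int)) :=
    regions.foldl (fun d p => d.modify p.1 [] (fun x => x ++ [p.2])) PySem.Dict.empty with hG
  have hKnd : G.keys.Nodup := by
    rw [hG]
    exact PySem.Dict.nodup_keys_foldl_modify_key regions (fun r => r.1) []
      (fun _ p => fun x => x ++ [p.2]) PySem.Dict.empty (by simp)
  have hKeysG : G.keys = PySem.Set.ofList (regions.map (fun r => r.1)) := by
    rw [hG]
    have := PySem.Dict.keys_foldl_modify_key regions (fun r => r.1) []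
      (fun _ p => fun x => x ++ [p.2]) PySem.Dict.empty
    simpa using this
  have hGval : ∀ c, G.getD c [] = (regions.filter (fun p => p.1 == c)).map (fun x => x.2) := by
    intro c
    rw [hG]
    simpa using PySem.Dict.getD_foldl_modify_append regions PySem.Dict.empty c
  -- chromosomes in G.keys occur in regions
  have hMem : ∀ c ∈ G.keys, ∃ q rest, (regions.filter (fun p => p.1 == c)) = q :: rest := by
    intro c hc
    rw [hKeysG, PySem.Set.mem_ofList] at hc
    obtain ⟨r, hr, hrc⟩ := List.mem_map.mp hc
    have : r ∈ regions.filter (fun p => p.1 == c) := by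
      simp [List.mem_filter, hr, hrc]
    cases hfil : regions.filter (fun p => p.1 == c) with
    | nil => rw [hfil] at this; cases this
    | cons q rest => exact ⟨q, rest, rfl⟩
  -- A's cov items
  have h1 : (regions.foldl (fun d r => d.modify r.1 [] (fun s => pvAddRange s r.2.1 r.2.2))
        PySem.Dict.empty).items
      = G.keys.map (fun c => (c, ((regions.filter (fun p => p.1 == c)).map (fun x => x.2)).foldl
          (fun s p => pvAddRange s p.1 p.2) [])) := by
    have hk : (regions.foldl (fun d r => d.modify r.1 [] (fun s => pvAddRange s r.2.1 r.2.2))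
        PySem.Dict.empty).keys = G.keys := by
      rw [hKeysG]
      have := PySem.Dict.keys_foldl_modify_key regions (fun r => r.1) []
        (fun _ r => fun s => pvAddRange s r.2.1 r.2.2) PySem.Dict.empty
      simpa using this
    have hnd : (regions.foldl (fun d r => d.modify r.1 [] (fun s => pvAddRange s r.2.1 r.2.2))
        PySem.Dict.empty).keys.Nodup := by rw [hk]; exact hKnd
    rw [PySem.Dict.items_eq_map_keys _ hnd [], hk]
    refine List.map_congr_left (fun c _ => ?_)
    rw [covA_getD, PySem.Dict.getD_empty]
  -- B's cov items
  have h2 : (G.items.foldl (fun d g => d.insert g.1 (g.2.foldl (fun s p => pvAddRange s p.1 p.2) []))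
        PySem.Dict.empty).items
      = G.keys.map (fun c => (c, ((regions.filter (fun p => p.1 == c)).map (fun x => x.2)).foldl
          (fun s p => pvAddRange s p.1 p.2) [])) := by
    rw [PySem.Dict.items_foldl_insert_fresh G.items (fun g => g.1)
      (fun g => g.2.foldl (fun s p => pvAddRange s p.1 p.2) []) PySem.Dict.empty
      (fun a _ => PySem.Dict.contains_empty _) hKnd]
    rw [PySem.Dict.items_eq_map_keys G hKnd []]
    simp only [List.map_map]
    refine List.map_congr_left (fun c _ => ?_)
    simp only [Function.comp_apply]
    rw [hGval c]
  -- A's lims items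
  have h3 : (regions.foldl (fun d r => d.insert r.1 (pvLimStep (d.get? r.1) r.2.1 r.2.2))
        PySem.Dict.empty).items
      = G.keys.map (fun c => (c, pvLimB ((regions.filter (fun p => p.1 == c)).map (fun x => x.2)))) := by
    have hk : (regions.foldl (fun d r => d.insert r.1 (pvLimStep (d.get? r.1) r.2.1 r.2.2))
        PySem.Dict.empty).keys = G.keys := by
      rw [hKeysG]
      have := PySem.Dict.keys_foldl_insert_key regions (fun r => r.1)
        (fun d r => pvLimStep (d.get? r.1) r.2.1 r.2.2) PySem.Dict.empty
      simpa using this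
    have hnd : (regions.foldl (fun d r => d.insert r.1 (pvLimStep (d.get? r.1) r.2.1 r.2.2))
        PySem.Dict.empty).keys.Nodup := by rw [hk]; exact hKnd
    rw [PySem.Dict.items_eq_map_keys _ hnd [], hk]
    refine List.map_congr_left (fun c hc => ?_)
    obtain ⟨q, rest, hfil⟩ := hMem c hc
    rw [PySem.Dict.getD_eq_get?_getD, limsA_get?, PySem.Dict.get?_empty, hfil]
    have hstep : pvLimStep none q.2.1 q.2.2 = [q.2.1, q.2.2] := rfl
    simp only [List.map_cons, List.foldl_cons, hstep, limsFold_closed, pvLimB,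
      List.map_map, min?_closed, max?_closed, Option.getD_some]
  -- B's lims items
  have h4 : (G.items.foldl (fun d g => d.insert g.1
        [(PySem.List.min? (g.2.map Prod.fst) (fun x => x)).getD 0,
         (PySem.List.max? (g.2.map Prod.snd) (fun x => x)).getD 0]) PySem.Dict.empty).items
      = G.keys.map (fun c => (c, pvLimB ((regions.filter (fun p => p.1 == c)).map (fun x => x.2)))) := by
    rw [PySem.Dict.items_foldl_insert_fresh G.items (fun g => g.1)
      (fun g => [(PySem.List.min? (g.2.map Prod.fst) (fun x => x)).getD 0,
                 (PySem.List.max? (g.2.map Prod.snd) (fun x => x)).getD 0]) PySem.Dict.empty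
      (fun a _ => PySem.Dict.contains_empty _) hKnd]
    rw [PySem.Dict.items_eq_map_keys G hKnd []]
    simp only [List.map_map]
    refine List.map_congr_left (fun c _ => ?_)
    simp only [Function.comp_apply, pvLimB]
    rw [hGval c]
  have hA : List.foldl (fun (st : PySem.Dict String (PySem.Set Int) × PySem.Dict String (List Int)) r =>
        (st.1.modify r.1 [] (fun s => pvAddRange s r.2.1 r.2.2),
         st.2.insert r.1 (pvLimStep (st.2.get? r.1) r.2.1 r.2.2)))
      (PySem.Dict.empty, PySem.Dict.empty) regions
      = (regions.foldl (fun d r => d.modify r.1 [] (fun s => pvAddRange s r.2.1 r.2.2)) PySem.Dict.empty,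
         regions.foldl (fun d r => d.insert r.1 (pvLimStep (d.get? r.1) r.2.1 r.2.2)) PySem.Dict.empty) :=
    PySem.List.foldl_prod_mk
      (fun (d : PySem.Dict String (PySem.Set Int)) r => d.modify r.1 [] (fun s => pvAddRange s r.2.1 r.2.2))
      (fun (d : PySem.Dict String (List Int)) (r : String × Int × Int) =>
        d.insert r.1 (pvLimStep (d.get? r.1) r.2.1 r.2.2))
      regions PySem.Dict.empty PySem.Dict.empty
  have hB : List.foldl (fun (st : PySem.Dict String (PySem.Set Int) × PySem.Dict String (List Int)) g =>
        (st.1.insert g.1 (g.2.foldl (fun s p => pvAddRange s p.1 p.2) []),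
         st.2.insert g.1 [(PySem.List.min? (g.2.map Prod.fst) (fun x => x)).getD 0,
                          (PySem.List.max? (g.2.map Prod.snd) (fun x => x)).getD 0]))
      (PySem.Dict.empty, PySem.Dict.empty) G.items
      = (G.items.foldl (fun d g => d.insert g.1 (g.2.foldl (fun s p => pvAddRange s p.1 p.2) []))
           PySem.Dict.empty,
         G.items.foldl (fun d g => d.insert g.1
           [(PySem.List.min? (g.2.map Prod.fst) (fun x => x)).getD 0,
            (PySem.List.max? (g.2.map Prod.snd) (fun x => x)).getD 0]) PySem.Dict.empty) :=
    PySem.List.foldl_prod_mk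
      (fun (d : PySem.Dict String (PySem.Set Int)) (g : String × List (Int × Int)) =>
        d.insert g.1 (g.2.foldl (fun s p => pvAddRange s p.1 p.2) []))
      (fun (d : PySem.Dict String (List Int)) (g : String × List (Int × Int)) =>
        d.insert g.1 [(PySem.List.min? (g.2.map Prod.fst) (fun x => x)).getD 0,
                      (PySem.List.max? (g.2.map Prod.snd) (fun x => x)).getD 0])
      G.items PySem.Dict.empty PySem.Dict.empty
  rw [hA, hB]
  dsimp only
  rw [h1, h2, h3, h4]

-- ===== VERDICT (by name: the statement is the Claim_ definition above) =====
theorem buildCov_spec : Claim_equal_buildCov := by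
  intro regions _
  exact buildCov_eq regions
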